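-- pv_equiv track=rewrite | github.com/kanishkamisra/minimal-category-abstraction | src/run_language_modeling.py | replace_element_in_seqs
-- ===== SOURCE A (Python) =====
-- def replace_element(element, repl: list, seq: list, return_idxes=False):
--     """Replace all occurrences of element in seq by repl
--     """
--     start_idx = 0
--     idxes = []
--     while True:
--         try:
--             element_idx = seq.index(element, start_idx)
--         except ValueError:
--             break
--         idxes.append(element_idx)
--         new_seq = seq[:element_idx] + repl
--         start_idx = len(new_seq)
--         new_seq += seq[element_idx+1:]
--         seq = new_seq
--     if return_idxes:
--         return seq, idxes
--     else:
--         return seq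
--
-- def replace_element_in_seqs(element, repl, seqs, return_idxes=False):
--     """Replace all occurrences of element in seqs by repl
--     Input:
--         seqs: list of sequences
--     Returns:
--         new_seqs: new seqs after replacement
--         idxes (optional): list of list of indexes where the repls start
--     """
--     rets = [
--         replace_element(element, repl, seq, return_idxes=return_idxes)
--         for seq in seqs]
--     if return_idxes:
--         return tuple(zip(*rets))
--     else:
--         return rets
-- ===== SOURCE B (Python) =====
-- def replace_element_in_seqs(element, repl, seqs, return_idxes=False):
--     """Replace all occurrences of element in seqs by repl.
--
--     Segment-based: split each seq into the maximal segments between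
--     occurrences of element, then concatenate segment + repl, tracking
--     each repl's start index with a running total."""
--     def split_seq(seq):
--         segs, cur = [], []
--         for x in seq:
--             if x == element:
--                 segs.append(cur)
--                 cur = []
--             else:
--                 cur.append(x)
--         return segs, cur
--     rets = []
--     for seq in seqs:
--         segs, last = split_seq(seq)
--         out, idxes, pos = [], [], 0
--         for seg in segs:
--             out.extend(seg)
--             pos += len(seg)
--             idxes.append(pos)
--             out.extend(repl)
--             pos += len(repl)
--         out.extend(last)
--         rets.append((out, idxes) if return_idxes else out)
--     if return_idxes:
--         return tuple(zip(*rets))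
--     return rets
-- ===== Notes on version B (the rewrite author's own statement) =====
-- stated objective: alternative
-- what changed: B splits each sequence once into the maximal segments between occurrences of element and builds the result by concatenating segment+repl with a running index total, instead of A's repeated seq.index re-search and list re-construction per occurrence.
-- outside the precondition, e.g. on replace_element_in_seqs(0, [9], [[0, 1]], True): A returns [[[9, 1]], [[0]]], B returns [[[9, 1]], [[0]]]
import Mathlib
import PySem

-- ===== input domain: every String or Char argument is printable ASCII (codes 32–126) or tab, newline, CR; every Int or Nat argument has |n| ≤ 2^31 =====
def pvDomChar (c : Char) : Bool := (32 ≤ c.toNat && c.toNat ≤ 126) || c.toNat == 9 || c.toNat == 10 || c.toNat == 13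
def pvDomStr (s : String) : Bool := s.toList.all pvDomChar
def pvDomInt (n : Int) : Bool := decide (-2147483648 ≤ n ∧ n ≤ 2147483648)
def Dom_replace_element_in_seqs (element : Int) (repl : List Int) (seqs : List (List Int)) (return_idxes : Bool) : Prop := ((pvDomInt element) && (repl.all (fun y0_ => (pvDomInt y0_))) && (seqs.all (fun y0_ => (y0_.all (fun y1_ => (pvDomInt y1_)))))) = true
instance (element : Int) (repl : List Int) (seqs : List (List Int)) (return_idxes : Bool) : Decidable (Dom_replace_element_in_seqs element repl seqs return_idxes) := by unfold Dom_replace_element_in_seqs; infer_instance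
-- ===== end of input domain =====

-- B replaces A's per-occurrence seq.index re-search and list rebuilding with a single
-- split into maximal segments between occurrences, then concatenation with a running
-- index total (objective: alternative decomposition, same results).


-- ===== PORT A =====
-- the while-loop of replace_element; Python's seq.index(element, start_idx) is ported
-- exactly as start_idx + (first index of element in seq[start_idx:]) — ValueError = none.
-- idxes is carried as in Python (it is computed even when return_idxes is false).
def replace_element_loop (element : Int) (repl : List Int) (seq : List Int) (start_idx : Nat) (idxes : List Int) : List Int × List Int :=
  match h : PySem.List.index? (seq.drop start_idx) element with
  | none => (seq, idxes)
  | some j =>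
      let element_idx := start_idx + j
      let new_seq := PySem.List.slice seq none (some (element_idx : Int)) ++ repl
      let new_seq2 := new_seq ++ PySem.List.slice seq (some ((element_idx : Int) + 1)) none
      replace_element_loop element repl new_seq2 new_seq.length (idxes ++ [(element_idx : Int)])
termination_by seq.length - start_idx
decreasing_by
  have hj : j < (seq.drop start_idx).length := by
    obtain ⟨hk, -, -⟩ := PySem.List.getElem_of_index?_eq_some h
    exact hk
  rw [List.length_drop] at hj
  have hslice : PySem.List.slice seq (some (((start_idx + j : Nat) : Int) + 1)) none
      = seq.drop (start_idx + j + 1) := by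
    have hc : (((start_idx + j : Nat) : Int) + 1) = ((start_idx + j + 1 : Nat) : Int) := by push_cast; ring
    rw [hc, PySem.List.slice_from_natCast]
  simp only [hslice, List.length_append, PySem.List.slice_to_natCast,
    List.length_take, List.length_drop]
  omega

-- replace_element: the pair (seq, idxes) stands for Python's conditional return
def replace_element (element : Int) (repl : List Int) (seq : List Int) (return_idxes : Bool) : List Int × List Int :=
  replace_element_loop element repl seq 0 []

-- with return_idxes=True Python A returns tuple(zip(*rets)), a pair of tuples that is not
-- a List (List Int); that branch is excluded by Pre_ and returns [] here (totality filler).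
def replace_element_in_seqs (element : Int) (repl : List Int) (seqs : List (List Int)) (return_idxes : Bool) : List (List Int) :=
  let rets := seqs.map (fun seq => replace_element element repl seq return_idxes)
  if return_idxes then [] else rets.map Prod.fst

-- ===== PORT B =====
-- split seq into (maximal segments before each occurrence of element, trailing segment)
def split_seq_alt (element : Int) (seq : List Int) : List (List Int) × List Int :=
  seq.foldl
    (fun (p : List (List Int) × List Int) x =>
      if x = element then (p.1 ++ [p.2], ([] : List Int)) else (p.1, p.2 ++ [x]))
    ([], [])

-- build (out, idxes, pos) from the segments: out gains seg ++ repl, idxes the running pos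
def build_alt (repl : List Int) (segs : List (List Int)) : List Int × List Int × Int :=
  segs.foldl
    (fun (p : List Int × List Int × Int) seg =>
      (p.1 ++ seg ++ repl, p.2.1 ++ [p.2.2 + (seg.length : Int)], p.2.2 + (seg.length : Int) + (repl.length : Int)))
    ([], [], 0)

-- as in port A, the return_idxes=True branch (tuple of tuples in Python) is outside Pre_
def replace_element_in_seqs_alt (element : Int) (repl : List Int) (seqs : List (List Int)) (return_idxes : Bool) : List (List Int) :=
  let rets := seqs.map (fun seq =>
    let sl := split_seq_alt element seq
    let b := build_alt repl sl.1
    (b.1 ++ sl.2, b.2.1))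
  if return_idxes then [] else rets.map Prod.fst

-- ===== PRECONDITION & SPEC =====
-- Pre_ excludes return_idxes = true, on which A returns tuple(zip(*rets)) — a pair of
-- tuples (or () for empty seqs), not a value of the declared List (List Int) return type.
def Pre_replace_element_in_seqs (element : Int) (repl : List Int) (seqs : List (List Int)) (return_idxes : Bool) : Prop :=
  return_idxes = false
instance (element : Int) (repl : List Int) (seqs : List (List Int)) (return_idxes : Bool) : Decidable (Pre_replace_element_in_seqs element repl seqs return_idxes) := by unfold Pre_replace_element_in_seqs; infer_instance

def pvWitness_replace_element_in_seqs : Int × List Int × List (List Int) × Bool :=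
  (0, [1, 2], [[0, 3, 0], [4]], false)

def Spec_replace_element_in_seqs (element : Int) (repl : List Int) (seqs : List (List Int)) (return_idxes : Bool) (out : List (List Int)) : Prop := out = replace_element_in_seqs_alt element repl seqs return_idxes
instance (element : Int) (repl : List Int) (seqs : List (List Int)) (return_idxes : Bool) (out : List (List Int)) : Decidable (Spec_replace_element_in_seqs element repl seqs return_idxes out) := by unfold Spec_replace_element_in_seqs; infer_instance

-- ===== CLAIM (what is proved, stated in full; the proofs are below) =====
def Claim_equal_replace_element_in_seqs : Prop := ∀ (element : Int) (repl : List Int) (seqs : List (List Int)) (return_idxes : Bool), Dom_replace_element_in_seqs element repl seqs return_idxes → Pre_replace_element_in_seqs element repl seqs return_idxes → Spec_replace_element_in_seqs element repl seqs return_idxes (replace_element_in_seqs element repl seqs return_idxes)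

-- ===== LEMMAS AND PROOFS =====

-- the common specification of one replaced sequence
def pvRepl (element : Int) (repl : List Int) (seq : List Int) : List Int :=
  seq.flatMap (fun x => if x = element then repl else [x])

theorem pvRepl_of_not_mem (element : Int) (repl : List Int) (p : List Int)
    (hp : element ∉ p) : pvRepl element repl p = p := by
  induction p with
  | nil => rfl
  | cons x xs ih =>
      simp only [List.mem_cons, not_or] at hp
      simp only [pvRepl, List.flatMap_cons] at *
      rw [if_neg (fun hh : x = element => hp.1 hh.symm), ih hp.2]
      rfl

theorem replace_element_loop_fst (element : Int) (repl : List Int) :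
    ∀ (n : Nat) (tail pre idxes : List Int), tail.length ≤ n →
      (replace_element_loop element repl (pre ++ tail) pre.length idxes).1
        = pre ++ pvRepl element repl tail := by
  intro n
  induction n with
  | zero =>
      intro tail pre idxes hlen
      have htail : tail = [] := List.eq_nil_of_length_eq_zero (Nat.le_zero.mp hlen)
      subst htail
      rw [replace_element_loop.eq_def]
      have hd : (pre ++ ([] : List Int)).drop pre.length = [] := by simp
      rw [hd]
      simp [pvRepl]
  | succ n ih =>
      intro tail pre idxes hlen
      rw [replace_element_loop.eq_def]
      have hd : (pre ++ tail).drop pre.length = tail := by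
        simp
      rw [hd]
      cases hidx : PySem.List.index? tail element with
      | none => simp [pvRepl_of_not_mem element repl tail
          ((PySem.List.index?_eq_none_iff tail element).mp hidx)]
      | some j =>
          obtain ⟨p, s, hts, hpl, hpnm⟩ := (PySem.List.index?_eq_some_iff tail element j).mp hidx
          have hlen2 : s.length ≤ n := by
            subst hts; simp at hlen; omega
          have hsl1 : PySem.List.slice (pre ++ tail) none (some ((pre.length : Int) + (j : Int)))
              = pre ++ p := by
            have hc : ((pre.length : Int) + (j : Int)) = ((pre.length + j : Nat) : Int) := by
              push_cast; ring
            rw [hc, PySem.List.slice_to_natCast]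
            subst hts
            rw [← hpl, ← List.append_assoc, ← List.length_append, List.take_left]
          have hsl2 : PySem.List.slice (pre ++ tail) (some ((pre.length : Int) + (j : Int) + 1))
              none = s := by
            have hc : ((pre.length : Int) + (j : Int) + 1) = ((pre.length + j + 1 : Nat) : Int) := by
              push_cast; ring
            rw [hc, PySem.List.slice_from_natCast]
            subst hts
            rw [← hpl]
            have h1 : pre ++ (p ++ element :: s) = (pre ++ p ++ [element]) ++ s := by simp
            have h2 : pre.length + p.length + 1 = (pre ++ p ++ [element]).length := by
              simp; omega
            rw [h1, h2, List.drop_left]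
          simp only [Nat.cast_add, hsl1, hsl2]
          rw [ih s (pre ++ p ++ repl) (idxes ++ [(pre.length : Int) + (j : Int)]) hlen2]
          subst hts
          simp [pvRepl, List.flatMap_append, List.flatMap_cons, List.append_assoc]
          exact (pvRepl_of_not_mem element repl p hpnm).symm

theorem replace_element_fst (element : Int) (repl : List Int) (seq : List Int) (ri : Bool) :
    (replace_element element repl seq ri).1 = pvRepl element repl seq := by
  have := replace_element_loop_fst element repl seq.length seq [] [] (le_refl _)
  simpa [replace_element] using this

theorem build_alt_fst (repl : List Int) :
    ∀ (segs : List (List Int)) (out0 idxes0 : List Int) (pos0 : Int),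
      (segs.foldl
        (fun (p : List Int × List Int × Int) seg =>
          (p.1 ++ seg ++ repl, p.2.1 ++ [p.2.2 + (seg.length : Int)], p.2.2 + (seg.length : Int) + (repl.length : Int)))
        (out0, idxes0, pos0)).1
      = out0 ++ segs.flatMap (fun seg => seg ++ repl) := by
  intro segs
  induction segs with
  | nil => intro out0 idxes0 pos0; simp
  | cons seg rest ih =>
      intro out0 idxes0 pos0
      simp only [List.foldl_cons, List.flatMap_cons]
      rw [ih]
      simp [List.append_assoc]

theorem split_seq_inv (element : Int) (repl : List Int) :
    ∀ (seq : List Int) (segs0 : List (List Int)) (cur0 : List Int),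
      (let r := seq.foldl
        (fun (p : List (List Int) × List Int) x =>
          if x = element then (p.1 ++ [p.2], ([] : List Int)) else (p.1, p.2 ++ [x]))
        (segs0, cur0)
       r.1.flatMap (fun seg => seg ++ repl) ++ r.2)
      = segs0.flatMap (fun seg => seg ++ repl) ++ cur0 ++ pvRepl element repl seq := by
  intro seq
  induction seq with
  | nil => intro segs0 cur0; simp [pvRepl]
  | cons x xs ih =>
      intro segs0 cur0
      by_cases hx : x = element
      · simp only [List.foldl_cons, if_pos hx]
        rw [ih]
        subst hx
        simp [pvRepl, List.flatMap_cons, List.append_assoc]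
      · simp only [List.foldl_cons, if_neg hx]
        rw [ih]
        simp [pvRepl, List.flatMap_cons, if_neg hx, List.append_assoc]

theorem alt_per_seq (element : Int) (repl : List Int) (seq : List Int) :
    (build_alt repl (split_seq_alt element seq).1).1 ++ (split_seq_alt element seq).2
      = pvRepl element repl seq := by
  unfold build_alt
  rw [build_alt_fst]
  have := split_seq_inv element repl seq [] []
  simpa [split_seq_alt] using this

-- ===== VERDICT (by name: the statement is the Claim_ definition above) =====
theorem replace_element_in_seqs_spec : Claim_equal_replace_element_in_seqs := by
  intro element repl seqs return_idxes _hdom hpre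
  unfold Spec_replace_element_in_seqs
  unfold Pre_replace_element_in_seqs at hpre
  subst hpre
  unfold replace_element_in_seqs replace_element_in_seqs_alt
  simp only [if_neg (by simp : ¬ (false = true)), List.map_map]
  apply List.map_congr_left
  intro seq _
  simp [Function.comp, replace_element_fst, alt_per_seq]
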